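-- pv_equiv track=rewrite | github.com/fpineda3105/kata-coding | python/test_vasya_clerck.py | valid_tickets
-- ===== SOURCE A (Python) =====
-- def valid_tickets(queue):
--     current_bills = {
--         25: 0,
--         50: 0,
--         100: 0
--     }
--
--     def verify_change(devolution):
--         if (devolution in current_bills and current_bills[devolution] > 0):
--             current_bills[devolution] -= 1
--             return True
--         elif devolution == 25:
--             return False
--         else:
--             return verify_change(devolution - 25) and verify_change(25)
--
--     for bill in queue:
--         current_bills[bill] += 1
--         if (bill == 25):
--             continue
--         else:
--             if (not verify_change(bill - 25)):
--                 return "NO"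
--
--     return 'YES'
-- ===== SOURCE B (Python) =====
-- def valid_tickets(queue):
--     current_bills = {25: 0, 50: 0, 100: 0}
--     for bill in queue:
--         current_bills[bill] += 1
--         if bill == 25:
--             continue
--         if bill == 50:
--             if current_bills[25] == 0:
--                 return "NO"
--             current_bills[25] -= 1
--         elif current_bills[50] > 0 and current_bills[25] > 0:
--             current_bills[50] -= 1
--             current_bills[25] -= 1
--         elif current_bills[25] >= 3:
--             current_bills[25] -= 3
--         else:
--             return "NO"
--     return 'YES'
-- ===== Notes on version B (the rewrite author's own statement) =====
-- stated objective: simpler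
-- what changed: Replaced the mutating recursive verify_change helper with inline change-making branches over the same bill-count dict (one 25 for a 50; a 50+25, else three 25s, for a 100), removing the recursion entirely.
-- outside the precondition, e.g. on valid_tickets([25, 25, 25, 100, 50, 7]): A returns 'NO', B returns 'NO'
import Mathlib
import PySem

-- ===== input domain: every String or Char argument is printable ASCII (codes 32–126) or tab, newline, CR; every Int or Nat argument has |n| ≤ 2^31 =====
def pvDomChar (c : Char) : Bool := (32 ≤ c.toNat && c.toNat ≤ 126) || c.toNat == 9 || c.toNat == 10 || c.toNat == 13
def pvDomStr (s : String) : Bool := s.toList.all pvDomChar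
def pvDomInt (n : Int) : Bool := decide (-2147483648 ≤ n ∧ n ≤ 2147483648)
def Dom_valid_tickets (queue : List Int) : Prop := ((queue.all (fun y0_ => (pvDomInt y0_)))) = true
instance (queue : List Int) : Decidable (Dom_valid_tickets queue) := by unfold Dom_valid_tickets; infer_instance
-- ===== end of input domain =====

-- B replaces A's dict of counts plus mutating recursive verify_change helper with two
-- plain counters and inline change-making branches; return value only (neither version
-- mutates its argument). Proved equal on queues of valid denominations (Pre_).

-- ===== PORT A =====
-- verify_change: the closure mutating current_bills; returns (result, updated dict).
-- Fuel-based port of Python's recursion on devolution: under Pre_ the only arguments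
-- reaching it are 25, 50, 75, whose call depth is ≤ 3, so fuel 4 is exact there.
def pvVerifyChange : Nat → Int → PySem.Dict Int Int → Bool × PySem.Dict Int Int
  | 0, _, bills => (false, bills)
  | fuel + 1, devolution, bills =>
    if (bills.contains devolution) = true ∧ bills.getD devolution 0 > 0 then
      (true, bills.insert devolution (bills.getD devolution 0 - 1))
    else if devolution = 25 then
      (false, bills)
    else
      -- 'verify_change(devolution - 25) and verify_change(25)' with Python's short-circuit
      let r1 := pvVerifyChange fuel (devolution - 25) bills
      if r1.1 then pvVerifyChange fuel 25 r1.2 else (false, r1.2)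

-- the for-loop with its early 'return "NO"'; 'current_bills[bill] += 1' raises KeyError
-- in Python when bill is not a key — here modelled by insert, excluded by Pre_.
def pvLoopA : List Int → PySem.Dict Int Int → String
  | [], _ => "YES"
  | bill :: rest, bills =>
    let bills := bills.insert bill (bills.getD bill 0 + 1)
    if bill = 25 then pvLoopA rest bills
    else
      let r := pvVerifyChange 4 (bill - 25) bills
      if ¬ r.1 = true then "NO" else pvLoopA rest r.2

def valid_tickets (queue : List Int) : String :=
  pvLoopA queue (PySem.Dict.ofList [(25, 0), (50, 0), (100, 0)])

-- ===== PORT B =====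
-- B keeps the 3-key dict (so an invalid bill still hits the missing key first, like A —
-- modelled by insert here, excluded by Pre_) but branches inline instead of recursing.
def pvLoopB : List Int → PySem.Dict Int Int → String
  | [], _ => "YES"
  | bill :: rest, bills =>
    let bills := bills.insert bill (bills.getD bill 0 + 1)
    if bill = 25 then pvLoopB rest bills
    else if bill = 50 then
      if bills.getD 25 0 = 0 then "NO"
      else pvLoopB rest (bills.insert 25 (bills.getD 25 0 - 1))
    else
      if bills.getD 50 0 > 0 ∧ bills.getD 25 0 > 0 then
        pvLoopB rest ((bills.insert 50 (bills.getD 50 0 - 1)).insert 25 (bills.getD 25 0 - 1))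
      else if bills.getD 25 0 ≥ 3 then
        pvLoopB rest (bills.insert 25 (bills.getD 25 0 - 3))
      else "NO"

def valid_tickets_alt (queue : List Int) : String :=
  pvLoopB queue (PySem.Dict.ofList [(25, 0), (50, 0), (100, 0)])

-- ===== PRECONDITION & SPEC =====
-- pvH queue a: every invalid denomination (not 25/50/100) in queue is preceded by a
-- prefix whose number of 25s (plus slack a) falls below its number of 50s and 100s —
-- a count certificate forcing "NO" before the invalid bill is reached.
def pvH (queue : List Int) (a : Int) : Prop :=
  ∀ i, i < queue.length →
    (queue.getD i 0 ≠ 25 ∧ queue.getD i 0 ≠ 50 ∧ queue.getD i 0 ≠ 100) →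
    ∃ j, j < i ∧ a + ((queue.take (j+1)).count 25 : Int) <
      ((queue.take (j+1)).count 50 : Int) + ((queue.take (j+1)).count 100 : Int)

-- Pre_ excludes queues on which A reaches a denomination other than 25/50/100 and raises
-- KeyError; the certificate is conservative, so it also excludes a few queues where A
-- happens to return "NO" just before an invalid bill (B returns the same "NO" there).
def Pre_valid_tickets (queue : List Int) : Prop := pvH queue 0
instance (queue : List Int) : Decidable (Pre_valid_tickets queue) := by
  unfold Pre_valid_tickets pvH; infer_instance
def pvWitness_valid_tickets : List Int := [25, 25, 50, 25, 100]

def Spec_valid_tickets (queue : List Int) (out : String) : Prop := out = valid_tickets_alt queue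
instance (queue : List Int) (out : String) : Decidable (Spec_valid_tickets queue out) := by unfold Spec_valid_tickets; infer_instance

-- ===== CLAIM (what is proved, stated in full; the proofs are below) =====
def Claim_equal_valid_tickets : Prop := ∀ (queue : List Int), Dom_valid_tickets queue → Pre_valid_tickets queue → Spec_valid_tickets queue (valid_tickets queue)

-- ===== LEMMAS AND PROOFS =====

-- One unfolding of pvVerifyChange when neither the direct-decrement branch nor the
-- devolution == 25 branch applies (fuel left abstract to keep terms small).
lemma vc_step (f : Nat) (d : Int) (bills : PySem.Dict Int Int)
    (hd : ¬((bills.contains d) = true ∧ bills.getD d 0 > 0)) (h25 : ¬ d = 25) :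
    pvVerifyChange (f+1) d bills =
      (let r1 := pvVerifyChange f (d-25) bills;
       if r1.1 then pvVerifyChange f 25 r1.2 else (false, r1.2)) := by
  conv_lhs => rw [pvVerifyChange]
  rw [if_neg hd, if_neg h25]

lemma vc25_pos (f : Nat) (hf : f ≠ 0) (a b c : Int) (ha : 0 < a) :
    pvVerifyChange f 25 ⟨[(25,a),(50,b),(100,c)]⟩ = (true, ⟨[(25,a-1),(50,b),(100,c)]⟩) := by
  obtain ⟨g, rfl⟩ : ∃ g, f = g + 1 := ⟨f - 1, by omega⟩
  simp [pvVerifyChange, PySem.Dict.insert, PySem.Dict.getD, PySem.Dict.get?, PySem.Dict.contains, ha]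

lemma vc25_zero (f : Nat) (hf : f ≠ 0) (a b c : Int) (ha : ¬ 0 < a) :
    pvVerifyChange f 25 ⟨[(25,a),(50,b),(100,c)]⟩ = (false, ⟨[(25,a),(50,b),(100,c)]⟩) := by
  obtain ⟨g, rfl⟩ : ∃ g, f = g + 1 := ⟨f - 1, by omega⟩
  simp [pvVerifyChange, PySem.Dict.getD, PySem.Dict.get?, PySem.Dict.contains, ha]

lemma vc50_pos (f : Nat) (hf : f ≠ 0) (a b c : Int) (hb : 0 < b) :
    pvVerifyChange f 50 ⟨[(25,a),(50,b),(100,c)]⟩ = (true, ⟨[(25,a),(50,b-1),(100,c)]⟩) := by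
  obtain ⟨g, rfl⟩ : ∃ g, f = g + 1 := ⟨f - 1, by omega⟩
  simp [pvVerifyChange, PySem.Dict.insert, PySem.Dict.getD, PySem.Dict.get?, PySem.Dict.contains, hb]

lemma no50cond (a b c : Int) (hb : ¬ 0 < b) :
    ¬(((PySem.Dict.mk [(25,a),(50,b),(100,c)] : PySem.Dict Int Int).contains 50) = true ∧
      (PySem.Dict.mk [(25,a),(50,b),(100,c)] : PySem.Dict Int Int).getD 50 0 > 0) := by
  simp [PySem.Dict.getD, PySem.Dict.get?, PySem.Dict.contains, hb]

lemma vc50_zero_two (f : Nat) (hf : 2 ≤ f) (a b c : Int) (hb : ¬ 0 < b) (ha : 2 ≤ a) :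
    pvVerifyChange f 50 ⟨[(25,a),(50,b),(100,c)]⟩ = (true, ⟨[(25,a-1-1),(50,b),(100,c)]⟩) := by
  obtain ⟨g, rfl⟩ : ∃ g, f = (g + 1) + 1 := ⟨f - 2, by omega⟩
  rw [vc_step (g+1) 50 _ (no50cond a b c hb) (by norm_num)]
  norm_num [vc25_pos (g+1) (by omega) a b c (by omega), vc25_pos (g+1) (by omega) (a-1) b c (by omega)]

lemma vc50_zero_one (f : Nat) (hf : 2 ≤ f) (b c : Int) (hb : ¬ 0 < b) :
    pvVerifyChange f 50 ⟨[(25,1),(50,b),(100,c)]⟩ = (false, ⟨[(25,0),(50,b),(100,c)]⟩) := by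
  obtain ⟨g, rfl⟩ : ∃ g, f = (g + 1) + 1 := ⟨f - 2, by omega⟩
  rw [vc_step (g+1) 50 _ (no50cond 1 b c hb) (by norm_num)]
  norm_num [vc25_pos (g+1) (by omega) 1 b c (by omega), vc25_zero (g+1) (by omega) 0 b c (by omega)]

lemma vc50_zero_zero (f : Nat) (hf : 2 ≤ f) (a b c : Int) (hb : ¬ 0 < b) (ha : ¬ 0 < a) :
    pvVerifyChange f 50 ⟨[(25,a),(50,b),(100,c)]⟩ = (false, ⟨[(25,a),(50,b),(100,c)]⟩) := by
  obtain ⟨g, rfl⟩ : ∃ g, f = (g + 1) + 1 := ⟨f - 2, by omega⟩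
  rw [vc_step (g+1) 50 _ (no50cond a b c hb) (by norm_num)]
  norm_num [vc25_zero (g+1) (by omega) a b c ha]

lemma no75cond (a b c : Int) :
    ¬(((PySem.Dict.mk [(25,a),(50,b),(100,c)] : PySem.Dict Int Int).contains 75) = true ∧
      (PySem.Dict.mk [(25,a),(50,b),(100,c)] : PySem.Dict Int Int).getD 75 0 > 0) := by
  simp [PySem.Dict.getD, PySem.Dict.get?, PySem.Dict.contains]

lemma vc75_unfold (f : Nat) (hf : f ≠ 0) (a b c : Int) :
    pvVerifyChange f 75 ⟨[(25,a),(50,b),(100,c)]⟩ =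
      (let r1 := pvVerifyChange (f-1) 50 ⟨[(25,a),(50,b),(100,c)]⟩;
       if r1.1 then pvVerifyChange (f-1) 25 r1.2 else (false, r1.2)) := by
  obtain ⟨g, rfl⟩ : ∃ g, f = g + 1 := ⟨f - 1, by omega⟩
  rw [vc_step g 75 _ (no75cond a b c) (by norm_num)]
  norm_num

-- one loop iteration of A for each bill / count situation, on the literal 3-key dict
lemma step25 (rest : List Int) (a b c : Int) :
    pvLoopA (25 :: rest) ⟨[(25,a),(50,b),(100,c)]⟩ = pvLoopA rest ⟨[(25,a+1),(50,b),(100,c)]⟩ := by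
  simp [pvLoopA, PySem.Dict.insert, PySem.Dict.getD, PySem.Dict.get?, PySem.Dict.contains]

lemma step50yes (rest : List Int) (a b c : Int) (ha : 0 < a) :
    pvLoopA (50 :: rest) ⟨[(25,a),(50,b),(100,c)]⟩ = pvLoopA rest ⟨[(25,a-1),(50,b+1),(100,c)]⟩ := by
  simp [pvLoopA, pvVerifyChange, PySem.Dict.insert, PySem.Dict.getD, PySem.Dict.get?, PySem.Dict.contains, ha]

lemma step50no (rest : List Int) (b c : Int) :
    pvLoopA (50 :: rest) ⟨[(25,0),(50,b),(100,c)]⟩ = "NO" := by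
  simp [pvLoopA, pvVerifyChange, PySem.Dict.insert, PySem.Dict.getD, PySem.Dict.get?, PySem.Dict.contains]

lemma insert100 (a b c : Int) :
    (PySem.Dict.mk [(25,a),(50,b),(100,c)] : PySem.Dict Int Int).insert 100
      ((PySem.Dict.mk [(25,a),(50,b),(100,c)] : PySem.Dict Int Int).getD 100 0 + 1) =
      ⟨[(25,a),(50,b),(100,c+1)]⟩ := by
  simp [PySem.Dict.insert, PySem.Dict.getD, PySem.Dict.get?, PySem.Dict.contains]

lemma loop100_unfold (rest : List Int) (a b c : Int) :
    pvLoopA (100 :: rest) ⟨[(25,a),(50,b),(100,c)]⟩ =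
      (let r := pvVerifyChange 4 75 ⟨[(25,a),(50,b),(100,c+1)]⟩;
       if ¬ r.1 = true then "NO" else pvLoopA rest r.2) := by
  conv_lhs => rw [pvLoopA]
  rw [insert100 a b c]
  norm_num

lemma step100both (rest : List Int) (a b c : Int) (ha : 0 < a) (hb : 0 < b) :
    pvLoopA (100 :: rest) ⟨[(25,a),(50,b),(100,c)]⟩ = pvLoopA rest ⟨[(25,a-1),(50,b-1),(100,c+1)]⟩ := by
  rw [loop100_unfold, vc75_unfold 4 (by norm_num) a b (c+1),
      vc50_pos (4-1) (by norm_num) a b (c+1) hb]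
  norm_num [vc25_pos 3 (by norm_num) a (b-1) (c+1) ha]

lemma step100no25 (rest : List Int) (b c : Int) (hb : 0 < b) :
    pvLoopA (100 :: rest) ⟨[(25,0),(50,b),(100,c)]⟩ = "NO" := by
  rw [loop100_unfold, vc75_unfold 4 (by norm_num) 0 b (c+1),
      vc50_pos (4-1) (by norm_num) 0 b (c+1) hb]
  norm_num [vc25_zero 3 (by norm_num) 0 (b-1) (c+1) (by omega)]

lemma step100three (rest : List Int) (a b c : Int) (hb : ¬ 0 < b) (ha : 3 ≤ a) :
    pvLoopA (100 :: rest) ⟨[(25,a),(50,b),(100,c)]⟩ = pvLoopA rest ⟨[(25,a-1-1-1),(50,b),(100,c+1)]⟩ := by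
  rw [loop100_unfold, vc75_unfold 4 (by norm_num) a b (c+1),
      vc50_zero_two (4-1) (by norm_num) a b (c+1) hb (by omega)]
  norm_num [vc25_pos 3 (by norm_num) (a-1-1) b (c+1) (by omega)]

lemma step100two (rest : List Int) (a b c : Int) (hb : ¬ 0 < b) (ha2 : a = 2) :
    pvLoopA (100 :: rest) ⟨[(25,a),(50,b),(100,c)]⟩ = "NO" := by
  subst ha2
  rw [loop100_unfold, vc75_unfold 4 (by norm_num) 2 b (c+1),
      vc50_zero_two (4-1) (by norm_num) 2 b (c+1) hb (by omega)]
  norm_num [vc25_zero 3 (by norm_num) 0 b (c+1) (by omega)]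

lemma step100one (rest : List Int) (b c : Int) (hb : ¬ 0 < b) :
    pvLoopA (100 :: rest) ⟨[(25,1),(50,b),(100,c)]⟩ = "NO" := by
  rw [loop100_unfold, vc75_unfold 4 (by norm_num) 1 b (c+1),
      vc50_zero_one (4-1) (by norm_num) b (c+1) hb]
  norm_num

lemma step100zero (rest : List Int) (a b c : Int) (hb : ¬ 0 < b) (ha : ¬ 0 < a) :
    pvLoopA (100 :: rest) ⟨[(25,a),(50,b),(100,c)]⟩ = "NO" := by
  rw [loop100_unfold, vc75_unfold 4 (by norm_num) a b (c+1),
      vc50_zero_zero (4-1) (by norm_num) a b (c+1) hb ha]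
  norm_num

-- pvH bookkeeping: weaker slack, head validity, and one-step shifts
lemma pvH_mono {q : List Int} {a a' : Int} (hle : a' ≤ a) (H : pvH q a) : pvH q a' := by
  intro i hi hb
  obtain ⟨j, hj, hv⟩ := H i hi hb
  exact ⟨j, hj, by omega⟩

lemma pvH_head {h : Int} {rest : List Int} {a : Int} (H : pvH (h :: rest) a) :
    h = 25 ∨ h = 50 ∨ h = 100 := by
  by_contra hc
  push Not at hc
  obtain ⟨j, hj, _⟩ := H 0 (by simp) (by simpa using hc)
  omega

lemma pvH_cons25 {rest : List Int} {a : Int} (ha : 0 ≤ a) (H : pvH (25 :: rest) a) :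
    pvH rest (a + 1) := by
  intro i hi hb
  obtain ⟨j, hj, hv⟩ := H (i+1) (by simpa using hi) (by simpa using hb)
  cases j with
  | zero => exfalso; simp at hv; omega
  | succ j' =>
    refine ⟨j', by omega, ?_⟩
    rw [List.take_succ_cons] at hv
    simp at hv ⊢
    omega

lemma pvH_cons50 {rest : List Int} {a : Int} (ha : 0 < a) (H : pvH (50 :: rest) a) :
    pvH rest (a - 1) := by
  intro i hi hb
  obtain ⟨j, hj, hv⟩ := H (i+1) (by simpa using hi) (by simpa using hb)
  cases j with
  | zero => exfalso; simp at hv; omega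
  | succ j' =>
    refine ⟨j', by omega, ?_⟩
    rw [List.take_succ_cons] at hv
    simp at hv ⊢
    omega

lemma pvH_cons100 {rest : List Int} {a : Int} (ha : 0 < a) (H : pvH (100 :: rest) a) :
    pvH rest (a - 1) := by
  intro i hi hb
  obtain ⟨j, hj, hv⟩ := H (i+1) (by simpa using hi) (by simpa using hb)
  cases j with
  | zero => exfalso; simp at hv; omega
  | succ j' =>
    refine ⟨j', by omega, ?_⟩
    rw [List.take_succ_cons] at hv
    simp at hv ⊢
    omega

-- one loop iteration of B for each bill / count situation, on the literal 3-key dict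
lemma stepB25 (rest : List Int) (a b c : Int) :
    pvLoopB (25 :: rest) ⟨[(25,a),(50,b),(100,c)]⟩ = pvLoopB rest ⟨[(25,a+1),(50,b),(100,c)]⟩ := by
  simp [pvLoopB, PySem.Dict.insert, PySem.Dict.getD, PySem.Dict.get?, PySem.Dict.contains]

lemma stepB50yes (rest : List Int) (a b c : Int) (ha : ¬ a = 0) :
    pvLoopB (50 :: rest) ⟨[(25,a),(50,b),(100,c)]⟩ = pvLoopB rest ⟨[(25,a-1),(50,b+1),(100,c)]⟩ := by
  simp [pvLoopB, PySem.Dict.insert, PySem.Dict.getD, PySem.Dict.get?, PySem.Dict.contains, ha]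

lemma stepB50no (rest : List Int) (b c : Int) :
    pvLoopB (50 :: rest) ⟨[(25,0),(50,b),(100,c)]⟩ = "NO" := by
  simp [pvLoopB, PySem.Dict.insert, PySem.Dict.getD, PySem.Dict.get?, PySem.Dict.contains]

lemma stepB100both (rest : List Int) (a b c : Int) (ha : 0 < a) (hb : 0 < b) :
    pvLoopB (100 :: rest) ⟨[(25,a),(50,b),(100,c)]⟩ = pvLoopB rest ⟨[(25,a-1),(50,b-1),(100,c+1)]⟩ := by
  simp [pvLoopB, PySem.Dict.insert, PySem.Dict.getD, PySem.Dict.get?, PySem.Dict.contains, ha, hb]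

lemma stepB100three (rest : List Int) (a b c : Int) (hno : ¬ (0 < b ∧ 0 < a)) (ha : 3 ≤ a) :
    pvLoopB (100 :: rest) ⟨[(25,a),(50,b),(100,c)]⟩ = pvLoopB rest ⟨[(25,a-3),(50,b),(100,c+1)]⟩ := by
  simp [pvLoopB, PySem.Dict.insert, PySem.Dict.getD, PySem.Dict.get?, PySem.Dict.contains, hno, ha]

lemma stepB100no (rest : List Int) (a b c : Int) (hno : ¬ (0 < b ∧ 0 < a)) (ha : ¬ 3 ≤ a) :
    pvLoopB (100 :: rest) ⟨[(25,a),(50,b),(100,c)]⟩ = "NO" := by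
  simp [pvLoopB, PySem.Dict.insert, PySem.Dict.getD, PySem.Dict.get?, PySem.Dict.contains, hno, ha]

-- main invariant: on the dict {25: a, 50: b, 100: c}, A's loop equals B's loop
lemma pvLoopAB (queue : List Int) :
    ∀ a b c : Int, 0 ≤ a → 0 ≤ b → pvH queue a →
    pvLoopA queue ⟨[(25,a),(50,b),(100,c)]⟩ = pvLoopB queue ⟨[(25,a),(50,b),(100,c)]⟩ := by
  induction queue with
  | nil => intro a b c _ _ _; rfl
  | cons bill rest ih =>
    intro a b c ha hb H
    rcases pvH_head H with h | h | h <;> subst h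
    · rw [step25, stepB25, ih (a+1) b c (by omega) hb (pvH_cons25 ha H)]
    · by_cases h25 : a = 0
      · subst h25; rw [step50no, stepB50no]
      · rw [step50yes rest a b c (by omega), stepB50yes rest a b c h25,
            ih (a-1) (b+1) c (by omega) (by omega) (pvH_cons50 (by omega) H)]
    · by_cases hb50 : 0 < b
      · by_cases ha25 : 0 < a
        · rw [step100both rest a b c ha25 hb50, stepB100both rest a b c ha25 hb50,
              ih (a-1) (b-1) (c+1) (by omega) (by omega) (pvH_cons100 ha25 H)]
        · have h0 : a = 0 := by omega
          subst h0
          rw [step100no25 rest b c hb50, stepB100no rest 0 b c (by omega) (by omega)]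
      · by_cases ha3 : 3 ≤ a
        · rw [step100three rest a b c hb50 ha3, stepB100three rest a b c (by omega) ha3,
              show a-1-1-1 = a-3 by ring,
              ih (a-3) b (c+1) (by omega) hb
                (pvH_mono (by omega) (pvH_cons100 (by omega) H))]
        · by_cases ha2 : a = 2
          · rw [step100two rest a b c hb50 ha2, stepB100no rest a b c (by omega) ha3]
          · by_cases ha1 : a = 1
            · subst ha1
              rw [step100one rest b c hb50, stepB100no rest 1 b c (by omega) ha3]
            · have h0 : ¬ 0 < a := by omega
              rw [step100zero rest a b c hb50 h0, stepB100no rest a b c (by omega) ha3]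

-- ===== VERDICT (by name: the statement is the Claim_ definition above) =====
theorem valid_tickets_spec : Claim_equal_valid_tickets := by
  intro queue _ hpre
  unfold Spec_valid_tickets valid_tickets valid_tickets_alt
  exact pvLoopAB queue 0 0 0 le_rfl le_rfl hpre
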